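-- pv_equiv track=rewrite | github.com/Klaudia1303/student_code_analysis | Progetto-tirocinio2024/data/student_data/2084208_Core/LabPython07/A_Ex7.py | A_Ex7
-- ===== SOURCE A (Python) =====
-- def A_Ex7(s):
--     l=[]
--     for i in range(len(s)):
--         carattere=s[i]
--         if carattere.isupper() and carattere not in l:
--             l.append(carattere)
--     l1=[]
--     for j in range(len(l)):
--         l1.append(ord(l[j]))
--     l1.sort()
--     l2=[]
--     for z in range(len(l1)):
--         l2.append(chr(l1[z]))
--     return l2
-- ===== SOURCE B (Python) =====
-- def A_Ex7(s):
--     # sort-then-dedup: collect uppercase chars, sort them, drop adjacent duplicates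
--     ups = [c for c in s if c.isupper()]
--     ups.sort()
--     out = []
--     for c in ups:
--         if not out or out[-1] != c:
--             out.append(c)
--     return out
-- ===== Notes on version B (the rewrite author's own statement) =====
-- stated objective: simpler
-- what changed: B collects the uppercase characters, sorts them, and removes adjacent duplicates in one linear pass (sort-then-dedup), instead of A's dedup-by-membership-scan over a growing list followed by an ord/sort/chr round-trip (dedup-then-sort).
import Mathlib
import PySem

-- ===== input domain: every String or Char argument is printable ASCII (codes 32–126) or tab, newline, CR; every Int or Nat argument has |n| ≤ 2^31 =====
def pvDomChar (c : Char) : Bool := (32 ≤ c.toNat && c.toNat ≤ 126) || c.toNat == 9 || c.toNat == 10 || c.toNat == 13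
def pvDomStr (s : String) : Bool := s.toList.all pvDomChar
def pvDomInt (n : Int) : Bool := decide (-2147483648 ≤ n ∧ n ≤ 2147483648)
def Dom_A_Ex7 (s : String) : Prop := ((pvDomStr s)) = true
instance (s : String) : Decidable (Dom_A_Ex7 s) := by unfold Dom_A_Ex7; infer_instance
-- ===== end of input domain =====

-- B sorts the uppercase characters first and removes adjacent duplicates in one pass
-- (sort-then-dedup) instead of A's dedup-with-membership-scan-then-sort-the-ords; objective: simpler.

-- ===== PORT A =====
def A_Ex7 (s : String) : List String :=
  let l := s.toList.foldl
    (fun l c => if PySem.Chars.isupper c && !(l.contains c) then l ++ [c] else l) []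
  let l1 := l.foldl (fun l1 c => l1 ++ [((c.toNat : Int))]) ([] : List Int)
  let l1s := PySem.List.sorted l1 (fun x => x)
  l1s.foldl (fun l2 n => l2 ++ [String.ofList [Char.ofNat n.toNat]]) ([] : List String)

-- ===== PORT B =====
def A_Ex7_alt (s : String) : List String :=
  let ups := s.toList.filter (fun c => PySem.Chars.isupper c)
  let upsS := PySem.List.sorted ups (fun x => x)
  let out := upsS.foldl
    (fun out c => if out.isEmpty || out.getLast? != some c then out ++ [c] else out)
    ([] : List Char)
  out.map (fun c => String.ofList [c])

-- ===== PRECONDITION & SPEC =====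
def Spec_A_Ex7 (s : String) (out : List String) : Prop := out = A_Ex7_alt s
instance (s : String) (out : List String) : Decidable (Spec_A_Ex7 s out) := by unfold Spec_A_Ex7; infer_instance

-- ===== CLAIM (what is proved, stated in full; the proofs are below) =====
def Claim_equal_A_Ex7 : Prop := ∀ (s : String), Dom_A_Ex7 s → Spec_A_Ex7 s (A_Ex7 s)

-- ===== LEMMAS AND PROOFS =====

-- Char order transfers along toNat.
theorem char_lt_of_toNat_lt (c d : Char) (h : c.toNat < d.toNat) : c < d :=
  Char.lt_def.mpr h

theorem char_toNat_injective : Function.Injective Char.toNat := by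
  intro c d h
  rw [← Char.ofNat_toNat c, ← Char.ofNat_toNat d, h]

-- A's second and third loops are maps written as append-folds.
theorem foldl_append_map {α β : Type} (f : α → β) (l : List α) (acc : List β) :
    l.foldl (fun r x => r ++ [f x]) acc = acc ++ l.map f := by
  induction l generalizing acc with
  | nil => simp
  | cons x l ih => simp [ih]

-- A's first loop: ordered dedup of the uppercase characters (characterised by Nodup + membership).
theorem afold_spec (cs : List Char) : ∀ acc : List Char, acc.Nodup →
    (cs.foldl (fun l c => if PySem.Chars.isupper c && !(l.contains c) then l ++ [c] else l)
      acc).Nodup ∧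
    ∀ a, a ∈ cs.foldl (fun l c => if PySem.Chars.isupper c && !(l.contains c) then l ++ [c] else l)
      acc ↔ a ∈ acc ∨ (PySem.Chars.isupper a = true ∧ a ∈ cs) := by
  induction cs with
  | nil => intro acc h; simpa using h
  | cons c cs ih =>
    intro acc hacc
    simp only [List.foldl_cons]
    by_cases hc : PySem.Chars.isupper c = true ∧ c ∉ acc
    · have hcond : (PySem.Chars.isupper c && !(acc.contains c)) = true := by
        simp [hc.1, hc.2]
      rw [if_pos hcond]
      have hnd : (acc ++ [c]).Nodup := by
        refine List.Nodup.append hacc (List.nodup_singleton c) ?_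
        intro a ha hb
        rw [List.mem_singleton] at hb
        exact hc.2 (hb ▸ ha)
      obtain ⟨h1, h2⟩ := ih (acc ++ [c]) hnd
      refine ⟨by simpa using h1, fun a => ?_⟩
      rw [h2 a]
      simp only [List.mem_append, List.mem_cons, List.not_mem_nil, or_false]
      constructor
      · rintro ((h | rfl) | ⟨hu, hm⟩)
        · exact Or.inl h
        · exact Or.inr ⟨hc.1, Or.inl rfl⟩
        · exact Or.inr ⟨hu, Or.inr hm⟩
      · rintro (h | ⟨hu, (rfl | hm)⟩)
        · exact Or.inl (Or.inl h)
        · exact Or.inl (Or.inr rfl)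
        · exact Or.inr ⟨hu, hm⟩
    · have hcond : (PySem.Chars.isupper c && !(acc.contains c)) = false := by
        rcases Decidable.not_and_iff_or_not.mp hc with h | h
        · simp [Bool.eq_false_iff.mpr h]
        · have : c ∈ acc := Decidable.not_not.mp h
          simp [this]
      rw [if_neg (ne_true_of_eq_false hcond)]
      obtain ⟨h1, h2⟩ := ih acc hacc
      refine ⟨h1, fun a => ?_⟩
      rw [h2 a]
      simp only [List.mem_cons]
      constructor
      · rintro (h | ⟨hu, hm⟩)
        · exact Or.inl h
        · exact Or.inr ⟨hu, Or.inr hm⟩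
      · rintro (h | ⟨hu, (rfl | hm)⟩)
        · exact Or.inl h
        · rcases Decidable.not_and_iff_or_not.mp hc with h' | h'
          · exact absurd hu h'
          · exact Or.inl (Decidable.not_not.mp h')
        · exact Or.inr ⟨hu, hm⟩

-- B's loop only looks at the accumulator's last element: a prefix factors out.
theorem bfold_shift (S : List Char) : ∀ (acc : List Char) (x : Char),
    S.foldl (fun out c => if out.isEmpty || out.getLast? != some c then out ++ [c] else out)
      (acc ++ [x]) =
    acc ++ S.foldl (fun out c => if out.isEmpty || out.getLast? != some c then out ++ [c] else out)
      [x] := by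
  induction S with
  | nil => intro acc x; rfl
  | cons c S ih =>
    intro acc x
    simp only [List.foldl_cons]
    by_cases hxc : x = c
    · subst hxc
      have h1 : ((acc ++ [x]).isEmpty || (acc ++ [x]).getLast? != some x) = false := by
        simp
      have h2 : (([x] : List Char).isEmpty || ([x] : List Char).getLast? != some x) = false := by
        simp
      rw [if_neg (ne_true_of_eq_false h1), if_neg (ne_true_of_eq_false h2), ih acc x]
    · have h1 : ((acc ++ [x]).isEmpty || (acc ++ [x]).getLast? != some c) = true := by
        simp [hxc]
      have h2 : (([x] : List Char).isEmpty || ([x] : List Char).getLast? != some c) = true := by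
        simp [hxc]
      rw [if_pos h1, if_pos h2]
      rw [ih (acc ++ [x]) c, ih [x] c, List.append_assoc]

-- B's loop on a ≤-sorted tail seeded with its head: strictly increasing, same members.
theorem bfold_spec (S : List Char) : ∀ x : Char, (x :: S).Pairwise (· ≤ ·) →
    (S.foldl (fun out c => if out.isEmpty || out.getLast? != some c then out ++ [c] else out)
      [x]).Pairwise (· < ·) ∧
    ∀ a, a ∈ S.foldl (fun out c => if out.isEmpty || out.getLast? != some c then out ++ [c] else out)
      [x] ↔ a = x ∨ a ∈ S := by
  induction S with
  | nil => intro x _; simp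
  | cons c S ih =>
    intro x hp
    have hxc : x ≤ c := (List.pairwise_cons.mp hp).1 c (List.mem_cons_self ..)
    have hcS : (c :: S).Pairwise (· ≤ ·) := (List.pairwise_cons.mp hp).2
    simp only [List.foldl_cons]
    by_cases hx : x = c
    · subst hx
      have h1 : (([x] : List Char).isEmpty || ([x] : List Char).getLast? != some x) = false := by
        simp
      rw [if_neg (ne_true_of_eq_false h1)]
      obtain ⟨p1, p2⟩ := ih x hcS
      refine ⟨p1, fun a => ?_⟩
      rw [p2 a]
      simp only [List.mem_cons]
      tauto
    · have h1 : (([x] : List Char).isEmpty || ([x] : List Char).getLast? != some c) = true := by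
        simp [hx]
      rw [if_pos h1]
      have hsh : S.foldl
          (fun out c => if out.isEmpty || out.getLast? != some c then out ++ [c] else out)
          ([x] ++ [c]) =
          [x] ++ S.foldl
          (fun out c => if out.isEmpty || out.getLast? != some c then out ++ [c] else out) [c] :=
        bfold_shift S [x] c
      obtain ⟨p1, p2⟩ := ih c hcS
      rw [hsh]
      simp only [List.cons_append, List.nil_append]
      constructor
      · refine List.pairwise_cons.mpr ⟨fun y hy => ?_, p1⟩
        rcases (p2 y).mp hy with rfl | hyS
        · exact lt_of_le_of_ne hxc hx
        · have hcy : c ≤ y := (List.pairwise_cons.mp hcS).1 y hyS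
          exact lt_of_lt_of_le (lt_of_le_of_ne hxc hx) hcy
      · intro a
        rw [List.mem_cons, p2 a, List.mem_cons]

-- Two strictly increasing lists with the same members are equal.
theorem strict_sorted_ext (xs ys : List Char)
    (hx : xs.Pairwise (· < ·)) (hy : ys.Pairwise (· < ·))
    (hmem : ∀ a, a ∈ xs ↔ a ∈ ys) : xs = ys := by
  have hnx : xs.Nodup := hx.imp ne_of_lt
  have hny : ys.Nodup := hy.imp ne_of_lt
  have hperm : xs.Perm ys := (List.perm_ext_iff_of_nodup hnx hny).mpr hmem
  exact List.Perm.eq_of_pairwise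
    (fun a b _ _ h1 h2 => absurd h1 (lt_asymm h2)) hx hy hperm

-- ===== VERDICT (by name: the statement is the Claim_ definition above) =====
theorem A_Ex7_spec : Claim_equal_A_Ex7 := by
  intro s _
  unfold Spec_A_Ex7 A_Ex7 A_Ex7_alt
  set cs := s.toList with hcs
  -- A's dedup list
  set D := cs.foldl
    (fun l c => if PySem.Chars.isupper c && !(l.contains c) then l ++ [c] else l) [] with hD
  obtain ⟨hDnd, hDmem⟩ := afold_spec cs [] List.nodup_nil
  rw [← hD] at hDnd hDmem
  simp only [List.not_mem_nil, false_or] at hDmem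
  -- A's second loop is a map; name the sorted ord list T
  rw [foldl_append_map]
  simp only [List.nil_append]
  set T := PySem.List.sorted (D.map (fun c => (c.toNat : Int))) (fun x => x) with hT
  rw [foldl_append_map]
  simp only [List.nil_append]
  -- characterise A's char-level output
  have hTmem : ∀ n, n ∈ T ↔ n ∈ D.map (fun c => (c.toNat : Int)) := fun n =>
    PySem.List.mem_sorted _ _ _ _
  have hmapnd : (D.map (fun c => (c.toNat : Int))).Nodup := by
    refine hDnd.map ?_
    intro a b h
    simp only at h
    exact char_toNat_injective (by exact_mod_cast h)
  have hTnd : T.Nodup := ((PySem.List.sorted_perm _ _ _).nodup_iff).mpr hmapnd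
  have hTle : T.Pairwise (fun a b => a ≤ b) := by
    simpa using PySem.List.sorted_pairwise (D.map (fun c => (c.toNat : Int))) (fun x => x)
  have hTlt : T.Pairwise (· < ·) := (hTle.and hTnd).imp (fun h => lt_of_le_of_ne h.1 h.2)
  set Achars := T.map (fun n => Char.ofNat n.toNat) with hAchars
  have hAlt : Achars.Pairwise (· < ·) := by
    rw [hAchars, List.pairwise_map]
    refine hTlt.imp_of_mem ?_
    intro m n hm hn hlt
    obtain ⟨c, hcD, rfl⟩ := List.mem_map.mp ((hTmem m).mp hm)
    obtain ⟨d, hdD, rfl⟩ := List.mem_map.mp ((hTmem n).mp hn)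
    simp only [Int.toNat_natCast, Char.ofNat_toNat]
    exact char_lt_of_toNat_lt c d (by exact_mod_cast hlt)
  have hAmem : ∀ a, a ∈ Achars ↔ a ∈ D := by
    intro a
    rw [hAchars]
    simp only [List.mem_map]
    constructor
    · rintro ⟨n, hn, rfl⟩
      obtain ⟨c, hcD, rfl⟩ := List.mem_map.mp ((hTmem n).mp hn)
      simpa using hcD
    · intro ha
      refine ⟨(a.toNat : Int), (hTmem _).mpr (List.mem_map.mpr ⟨a, ha, rfl⟩), by simp⟩
  -- B's side
  set ups := cs.filter (fun c => PySem.Chars.isupper c) with hups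
  set S := PySem.List.sorted ups (fun x => x) with hS
  have hSle : S.Pairwise (· ≤ ·) := by
    simpa using PySem.List.sorted_pairwise ups (fun x => x)
  have hSmem : ∀ a, a ∈ S ↔ a ∈ ups := fun a => PySem.List.mem_sorted _ _ _ _
  have hupsmem : ∀ a, a ∈ ups ↔ PySem.Chars.isupper a = true ∧ a ∈ cs := by
    intro a; rw [hups]; simp [List.mem_filter, and_comm]
  -- the char-level outputs agree
  suffices h : Achars = S.foldl
      (fun out c => if out.isEmpty || out.getLast? != some c then out ++ [c] else out) [] by
    calc T.map (fun n => String.ofList [Char.ofNat n.toNat])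
        = Achars.map (fun c => String.ofList [c]) := by
          rw [hAchars, List.map_map]; rfl
      _ = _ := by rw [h]
  cases hSc : S with
  | nil =>
    simp only [List.foldl_nil]
    rw [hAchars]
    have : D = [] := by
      refine List.eq_nil_iff_forall_not_mem.mpr fun a ha => ?_
      have := (hDmem a).mp ha
      have : a ∈ S := (hSmem a).mpr ((hupsmem a).mpr this)
      simp [hSc] at this
    simp [this, hT]
    rfl
  | cons x S' =>
    have hstep : (([] : List Char).isEmpty ||
        ([] : List Char).getLast? != some x) = true := by simp
    rw [List.foldl_cons, if_pos hstep]
    simp only [List.nil_append]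
    obtain ⟨hp1, hp2⟩ := bfold_spec S' x (hSc ▸ hSle)
    refine strict_sorted_ext _ _ hAlt hp1 fun a => ?_
    rw [hAmem a, hp2 a, hDmem a, ← hupsmem a, ← hSmem a, hSc]
    simp [List.mem_cons]
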